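-- pv_equiv track=rewrite | github.com/keithwsmith/mlb_ai | app.py | trim_to_token_budget
-- ===== SOURCE A (Python) =====
-- def trim_to_token_budget(text: str, max_chars: int = 3000) -> str:
--     if len(text) <= max_chars:
--         return text
--     lines = text.splitlines()
--     result = []
--     total = 0
--     for line in lines:
--         if total + len(line) + 1 > max_chars:
--             break
--         result.append(line)
--         total += len(line) + 1
--     return "\n".join(result) + "\n... [truncated]"
-- ===== SOURCE B (Python) =====
-- def trim_to_token_budget(text: str, max_chars: int = 3000) -> str:
--     if len(text) <= max_chars:
--         return text
--     lines = text.splitlines()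
--     prefixes = []
--     running = 0
--     for line in lines:
--         running += len(line) + 1
--         prefixes.append(running)
--     count = sum(1 for p in prefixes if p <= max_chars)
--     return "\n".join(lines[:count]) + "\n... [truncated]"
-- ===== Notes on version B (the rewrite author's own statement) =====
-- stated objective: alternative
-- what changed: Replaces A's break-on-overflow accumulation loop by a prefix-sum decomposition: build the running cumulative line costs once, count how many prefix sums stay within the budget (valid because costs are strictly positive, so prefix sums are increasing), and slice lines[:count].
import Mathlib
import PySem

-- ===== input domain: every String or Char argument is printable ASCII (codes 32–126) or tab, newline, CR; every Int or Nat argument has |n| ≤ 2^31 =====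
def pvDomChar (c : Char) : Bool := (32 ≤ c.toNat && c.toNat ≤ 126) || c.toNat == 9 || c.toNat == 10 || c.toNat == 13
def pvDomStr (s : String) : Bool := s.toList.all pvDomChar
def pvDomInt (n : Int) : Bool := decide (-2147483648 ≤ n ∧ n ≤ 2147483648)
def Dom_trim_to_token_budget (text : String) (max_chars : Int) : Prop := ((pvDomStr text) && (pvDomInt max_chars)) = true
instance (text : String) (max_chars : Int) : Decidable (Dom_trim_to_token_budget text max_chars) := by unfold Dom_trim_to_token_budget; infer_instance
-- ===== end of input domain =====

-- B replaces A's break-on-overflow accumulation loop by prefix sums: count the cumulative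
-- line costs that stay within the budget, then slice; same value, alternative decomposition.

-- ===== PORT A =====
-- the for-loop with break: result accumulator (reversed), running total
def pvLoopA (m : Int) : List String → List String → Int → List String
  | [], res, _ => res.reverse
  | l :: ls, res, total =>
    if total + PySem.Str.len l + 1 > m then res.reverse
    else pvLoopA m ls (l :: res) (total + PySem.Str.len l + 1)

def trim_to_token_budget (text : String) (max_chars : Int) : String :=
  if PySem.Str.len text ≤ max_chars then text
  else
    PySem.Str.join "\n" (pvLoopA max_chars (PySem.Str.splitlines text) [] 0)
      ++ "\n... [truncated]"

-- ===== PORT B =====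
-- running prefix sums of the per-line costs (Source B's prefixes loop)
def pvAccum : List Int → Int → List Int
  | [], _ => []
  | c :: cs, acc => (acc + c) :: pvAccum cs (acc + c)

def trim_to_token_budget_alt (text : String) (max_chars : Int) : String :=
  if PySem.Str.len text ≤ max_chars then text
  else
    let lines := PySem.Str.splitlines text
    let prefixes := pvAccum (lines.map (fun l => PySem.Str.len l + 1)) 0
    let count := prefixes.countP (fun p => decide (p ≤ max_chars))
    PySem.Str.join "\n" (lines.take count) ++ "\n... [truncated]"

-- ===== PRECONDITION & SPEC =====
def Spec_trim_to_token_budget (text : String) (max_chars : Int) (out : String) : Prop := out = trim_to_token_budget_alt text max_chars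
instance (text : String) (max_chars : Int) (out : String) : Decidable (Spec_trim_to_token_budget text max_chars out) := by unfold Spec_trim_to_token_budget; infer_instance

-- ===== CLAIM (what is proved, stated in full; the proofs are below) =====
def Claim_equal_trim_to_token_budget : Prop := ∀ (text : String) (max_chars : Int), Dom_trim_to_token_budget text max_chars → Spec_trim_to_token_budget text max_chars (trim_to_token_budget text max_chars)

-- ===== LEMMAS AND PROOFS =====

theorem pvStrLen_nonneg (s : String) : 0 ≤ PySem.Str.len s := by
  simp [PySem.Str.len_eq]

-- every prefix sum of nonnegative costs starting from acc is ≥ acc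
theorem pvAccum_ge (cs : List Int) (acc : Int) (h : ∀ c ∈ cs, 0 ≤ c) :
    ∀ x ∈ pvAccum cs acc, acc ≤ x := by
  induction cs generalizing acc with
  | nil => simp [pvAccum]
  | cons c cs ih =>
    intro x hx
    simp only [pvAccum, List.mem_cons] at hx
    have hc : 0 ≤ c := h c (by simp)
    rcases hx with rfl | hx
    · omega
    · have := ih (acc + c) (fun d hd => h d (by simp [hd])) x hx
      omega

theorem pvLoopA_eq (m : Int) (ls : List String) (res : List String) (total : Int) :
    pvLoopA m ls res total =
      res.reverse ++ ls.take ((pvAccum (ls.map (fun l => PySem.Str.len l + 1)) total).countP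
        (fun p => decide (p ≤ m))) := by
  induction ls generalizing res total with
  | nil => simp [pvLoopA, pvAccum]
  | cons l ls ih =>
    show (if total + PySem.Str.len l + 1 > m then res.reverse
          else pvLoopA m ls (l :: res) (total + PySem.Str.len l + 1)) =
      res.reverse ++ (l :: ls).take
        (((total + (PySem.Str.len l + 1)) ::
          pvAccum (ls.map (fun l => PySem.Str.len l + 1)) (total + (PySem.Str.len l + 1))).countP
          (fun p => decide (p ≤ m)))
    by_cases h : total + PySem.Str.len l + 1 > m
    · have hrest : ∀ x ∈ pvAccum (ls.map (fun l => PySem.Str.len l + 1))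
          (total + (PySem.Str.len l + 1)), ¬ (x ≤ m) := by
        intro x hx
        have := pvAccum_ge _ _ (by
          intro c hc
          simp only [List.mem_map] at hc
          obtain ⟨s, _, rfl⟩ := hc
          have := pvStrLen_nonneg s
          omega) x hx
        omega
      have hcnt : ((total + (PySem.Str.len l + 1)) ::
          pvAccum (ls.map (fun l => PySem.Str.len l + 1)) (total + (PySem.Str.len l + 1))).countP
            (fun p => decide (p ≤ m)) = 0 := by
        rw [List.countP_eq_zero]
        intro x hx
        simp only [List.mem_cons] at hx
        rcases hx with rfl | hx
        · simp only [decide_eq_true_eq]; omega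
        · simpa using hrest x hx
      rw [if_pos h, hcnt]
      simp
    · rw [if_neg h, ih (l :: res) (total + PySem.Str.len l + 1)]
      rw [List.countP_cons_of_pos (by simp only [decide_eq_true_eq]; omega)]
      have e : total + PySem.Str.len l + 1 = total + (PySem.Str.len l + 1) := by ring
      rw [e]
      simp [List.take_succ_cons]

-- ===== VERDICT (by name: the statement is the Claim_ definition above) =====
theorem trim_to_token_budget_spec : Claim_equal_trim_to_token_budget := by
  intro text max_chars _
  unfold Spec_trim_to_token_budget trim_to_token_budget trim_to_token_budget_alt
  by_cases h : PySem.Str.len text ≤ max_chars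
  · rw [if_pos h, if_pos h]
  · rw [if_neg h, if_neg h, pvLoopA_eq]
    simp
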